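-- pv_equiv track=rewrite | github.com/tbenthompson/3bem | tbempy/build_ext.py | remove_arch
-- ===== SOURCE A (Python) =====
-- def remove_arch(flags):
--     new_flags = []
--     # One parameter after '-arch' must also be removed since arch params
--     # are specified like '-arch i386'
--     skip = 0
--     for i in range(len(flags)):
--         if skip > 0:
--             skip -= 1
--             continue
--         p = flags[i]
--         if p == '-arch':
--             skip = 1
--             continue
--         new_flags.append(p)
--     return new_flags
-- ===== SOURCE B (Python) =====
-- def remove_arch(flags):
--     # Pass 1: collect the indices to drop ('-arch' markers and their argument).
--     # A marker that is itself the argument of a previous marker is not a marker.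
--     remove = set()
--     for i, p in enumerate(flags):
--         if p == '-arch' and i not in remove:
--             remove.add(i)
--             remove.add(i + 1)
--     # Pass 2: keep everything whose index survived.
--     return [flags[i] for i in range(len(flags)) if i not in remove]
-- ===== Notes on version B (the rewrite author's own statement) =====
-- stated objective: alternative
-- what changed: Replaces A's stateful skip-counter single pass by two staged passes: first build a set of indices to remove (each effective '-arch' marker and the index after it), then rebuild the list by filtering range(len(flags)) against that index set.
import Mathlib
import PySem

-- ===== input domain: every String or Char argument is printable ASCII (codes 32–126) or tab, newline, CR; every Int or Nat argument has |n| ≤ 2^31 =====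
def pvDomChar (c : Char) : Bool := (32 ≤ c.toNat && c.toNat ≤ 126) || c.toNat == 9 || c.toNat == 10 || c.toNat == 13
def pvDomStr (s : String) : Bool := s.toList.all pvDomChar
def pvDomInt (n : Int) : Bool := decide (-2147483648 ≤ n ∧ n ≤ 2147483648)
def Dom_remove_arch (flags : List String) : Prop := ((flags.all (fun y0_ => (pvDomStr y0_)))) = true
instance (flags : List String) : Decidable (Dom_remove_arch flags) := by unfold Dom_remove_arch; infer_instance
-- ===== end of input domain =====

-- B replaces A's stateful skip-counter single pass by two staged passes: first collect the set of
-- indices to remove (each effective '-arch' and its following index), then filter range(len) by it.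

-- ===== PORT A =====
-- one loop iteration of A: state = (new_flags, skip), p = flags[i]
def archStep (st : List String × Int) (p : String) : List String × Int :=
  if st.2 > 0 then (st.1, st.2 - 1)
  else if p == "-arch" then (st.1, 1)
  else (st.1 ++ [p], st.2)

def remove_arch (flags : List String) : List String :=
  ((PySem.List.pyRange 0 flags.length 1).foldl
    (fun st i => archStep st (PySem.List.pyGetD flags i "")) ([], 0)).1

-- ===== PORT B =====
-- pass 1 body of Source B: if p == '-arch' and i not in remove: remove.add(i); remove.add(i+1)
def markStep (s : PySem.Set Int) (ip : Int × String) : PySem.Set Int :=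
  if ip.2 == "-arch" && !(PySem.Set.contains s ip.1) then
    PySem.Set.add (PySem.Set.add s ip.1) (ip.1 + 1)
  else s

def remove_arch_alt (flags : List String) : List String :=
  ((PySem.List.pyRange 0 flags.length 1).filter
      (fun i => !(PySem.Set.contains ((PySem.List.enumerate flags).foldl markStep PySem.Set.empty) i))).map
    (fun i => PySem.List.pyGetD flags i "")

-- ===== PRECONDITION & SPEC =====
def Spec_remove_arch (flags : List String) (out : List String) : Prop := out = remove_arch_alt flags
instance (flags : List String) (out : List String) : Decidable (Spec_remove_arch flags out) := by unfold Spec_remove_arch; infer_instance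

-- ===== CLAIM (what is proved, stated in full; the proofs are below) =====
def Claim_equal_remove_arch : Prop := ∀ (flags : List String), Dom_remove_arch flags → Spec_remove_arch flags (remove_arch flags)

-- ===== LEMMAS AND PROOFS =====

-- reference recursion: A's skip-counter loop, on the remaining list with a Boolean skip flag
def aRun : Bool → List String → List String
  | _, [] => []
  | true, _ :: xs => aRun false xs
  | false, x :: xs => if x == "-arch" then aRun true xs else x :: aRun false xs

-- B's first pass, as a structural recursion over the remaining list with the running index
def markFold : List String → Int → PySem.Set Int → PySem.Set Int
  | [], _, s => s
  | p :: ps, k, s => markFold ps (k + 1) (markStep s (k, p))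

-- B's second pass, as a structural recursion: keep l[t] iff its global index k+t is not in S
def pick : List String → Int → PySem.Set Int → List String
  | [], _, _ => []
  | p :: ps, k, S => (if PySem.Set.contains S k then [] else [p]) ++ pick ps (k + 1) S

theorem contains_add (s : PySem.Set Int) (x y : Int) :
    PySem.Set.contains (PySem.Set.add s x) y = (PySem.Set.contains s y || y == x) := by
  by_cases hm : x ∈ s <;> by_cases hyx : y = x <;>
    simp [PySem.Set.add, PySem.Set.contains, hm, hyx]

theorem enumerate_foldl_eq_markFold (l : List String) : ∀ (k : Int) (s : PySem.Set Int),
    (PySem.List.enumerate l k).foldl markStep s = markFold l k s := by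
  induction l with
  | nil => intro k s; simp [PySem.List.enumerate_nil, markFold]
  | cons p ps ih =>
      intro k s
      rw [PySem.List.enumerate_cons, List.foldl_cons, markFold, ih]

-- markFold never touches indices below its running index
theorem markFold_contains_lt (l : List String) : ∀ (k : Int) (s : PySem.Set Int) (j : Int),
    j < k → PySem.Set.contains (markFold l k s) j = PySem.Set.contains s j := by
  induction l with
  | nil => intro k s j _; rfl
  | cons p ps ih =>
      intro k s j hj
      rw [markFold, ih _ _ _ (by omega : j < k + 1)]
      unfold markStep
      split
      · rw [contains_add, contains_add]
        have h1 : (j == k) = false := by simp; omega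
        have h2 : (j == k + 1) = false := by simp; omega
        simp [h1, h2]
      · rfl

-- the two staged passes together compute A's skip-counter run
theorem pick_markFold_eq_aRun (l : List String) : ∀ (k : Int) (s : PySem.Set Int) (b : Bool),
    (∀ j : Int, k ≤ j → (PySem.Set.contains s j = true ↔ (j = k ∧ b = true))) →
    pick l k (markFold l k s) = aRun b l := by
  induction l with
  | nil => intro k s b _; cases b <;> rfl
  | cons p ps ih =>
      intro k s b hinv
      rw [markFold, pick]
      have hk : PySem.Set.contains (markFold ps (k + 1) (markStep s (k, p))) k
          = PySem.Set.contains (markStep s (k, p)) k :=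
        markFold_contains_lt ps (k + 1) _ k (by omega)
      have hsk : PySem.Set.contains s k = b := by
        by_cases hb : b = true
        · subst hb; exact ((hinv k le_rfl).mpr ⟨rfl, rfl⟩)
        · simp only [Bool.not_eq_true] at hb; subst hb
          by_cases hc : PySem.Set.contains s k = true
          · exact absurd ((hinv k le_rfl).mp hc).2 (by simp)
          · simpa using hc
      cases b with
      | true =>
          have hmem : k ∈ s := by simpa [PySem.Set.contains] using hsk
          have hstep : markStep s (k, p) = s := by
            unfold markStep; simp [hmem]
          rw [hstep] at hk ⊢
          rw [hk, hsk, if_pos rfl]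
          have := ih (k + 1) s false (by
            intro j hj
            constructor
            · intro hc
              have := (hinv j (by omega)).mp hc
              omega
            · rintro ⟨_, h⟩; exact absurd h (by simp))
          simpa [aRun] using this
      | false =>
          by_cases hp : p == "-arch"
          · have hns : k ∉ s := by
              intro hm; simp [PySem.Set.contains, hm] at hsk
            have hstep : markStep s (k, p) = PySem.Set.add (PySem.Set.add s k) (k + 1) := by
              unfold markStep; simp [hp, hns]
            rw [hstep] at hk ⊢
            have hck : PySem.Set.contains (PySem.Set.add (PySem.Set.add s k) (k + 1)) k = true := by
              rw [contains_add, contains_add]; simp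
            rw [hk, hck, if_pos rfl]
            have := ih (k + 1) (PySem.Set.add (PySem.Set.add s k) (k + 1)) true (by
              intro j hj
              rw [contains_add, contains_add]
              constructor
              · intro hc
                simp only [Bool.or_eq_true, beq_iff_eq] at hc
                rcases hc with (hc | hc) | hc
                · have := (hinv j (by omega)).mp hc; omega
                · omega
                · exact ⟨hc, rfl⟩
              · rintro ⟨hj1, _⟩; simp [hj1])
            rw [this]
            have hp' : p = "-arch" := by simpa using hp
            simp [aRun, hp']
          · have hstep : markStep s (k, p) = s := by
              unfold markStep; simp [hp]
            rw [hstep] at hk ⊢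
            rw [hk, hsk, if_neg (by simp)]
            have := ih (k + 1) s false (by
              intro j hj
              constructor
              · intro hc
                have := (hinv j (by omega)).mp hc; omega
              · rintro ⟨_, h⟩; exact absurd h (by simp))
            rw [this]
            have hp' : ¬ p = "-arch" := by simpa using hp
            simp [aRun, hp']

-- B's range-filter-map second pass is exactly 'pick' on the dropped suffix
theorem filter_map_eq_pick (flags : List String) (S : PySem.Set Int) : ∀ (a : Nat), a ≤ flags.length →
    ((PySem.List.pyRange a flags.length 1).filter (fun i => !(PySem.Set.contains S i))).map
      (fun i => PySem.List.pyGetD flags i "") = pick (flags.drop a) a S := by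
  intro a ha
  induction h : flags.length - a generalizing a with
  | zero =>
      have : (a : Int) ≥ flags.length := by omega
      rw [List.drop_eq_nil_of_le (by omega), PySem.List.pyRange_one_eq_nil (by exact_mod_cast this)]
      rfl
  | succ m ih =>
      have hlt : a < flags.length := by omega
      rw [PySem.List.pyRange_one_cons (by exact_mod_cast hlt)]
      rw [List.drop_eq_getElem_cons hlt, pick]
      simp only [List.filter_cons]
      have hg : PySem.List.pyGetD flags (a : Int) "" = flags[a] := by
        rw [PySem.List.pyGetD_natCast, List.getD_eq_getElem _ _ hlt]
      have hrest := ih (a + 1) (by omega) (by omega)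
      push_cast at hrest ⊢
      simp only [PySem.Set.contains, List.contains_eq_mem] at hrest
      by_cases hm : (a : Int) ∈ S
      · simpa [hm] using hrest
      · simp [hm, hg, hrest]

-- A's foldl over the whole list, with skip flag b, appends aRun b to the accumulator
theorem foldl_archStep_eq_aRun (l : List String) : ∀ (out : List String) (b : Bool),
    (l.foldl archStep (out, if b then 1 else 0)).1 = out ++ aRun b l := by
  induction l with
  | nil => intro out b; simp [aRun]
  | cons p ps ih =>
      intro out b
      cases b with
      | true =>
          have : archStep (out, 1) p = (out, 0) := by simp [archStep]
          rw [List.foldl_cons]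
          simpa [this, aRun] using ih out false
      | false =>
          by_cases hp : p == "-arch"
          · have : archStep (out, 0) p = (out, 1) := by simp [archStep, hp]
            rw [List.foldl_cons]
            have hp' : p = "-arch" := by simpa using hp
            simpa [this, aRun, hp'] using ih out true
          · have : archStep (out, 0) p = (out ++ [p], 0) := by simp [archStep, hp]
            rw [List.foldl_cons]
            have hp' : ¬ p = "-arch" := by simpa using hp
            simpa [this, aRun, hp'] using ih (out ++ [p]) false

-- ===== VERDICT (by name: the statement is the Claim_ definition above) =====
theorem remove_arch_spec : Claim_equal_remove_arch := by
  intro flags _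
  unfold Spec_remove_arch remove_arch remove_arch_alt
  rw [PySem.List.foldl_pyRange_zero_pyGetD' flags "" archStep ([], 0)]
  have hA : (flags.foldl archStep ([], 0)).1 = aRun false flags := by
    simpa using foldl_archStep_eq_aRun flags [] false
  rw [hA]
  rw [enumerate_foldl_eq_markFold flags 0 PySem.Set.empty]
  have hP := filter_map_eq_pick flags (markFold flags 0 PySem.Set.empty) 0 (by omega)
  simp only [Nat.cast_zero, List.drop_zero] at hP
  rw [hP]
  exact (pick_markFold_eq_aRun flags 0 PySem.Set.empty false (by
    intro j _; simp [PySem.Set.empty, PySem.Set.contains])).symm
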